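-- pv_equiv track=rewrite | github.com/pedrosimao10/Tetris-AI-Agent | studentNoRotation.py | getBumpiness
-- ===== SOURCE A (Python) =====
-- def getBumpiness(virtualgame):
--     bumpiness = 0
--     for i in range(1,8,1):
--         min_Y_c1 = 30
--         min_Y_c2 = 30
--         for coordinates in virtualgame:
--             if (coordinates[0] == i) and (coordinates[1] < min_Y_c1):
--                 min_Y_c1 = coordinates[1]
--             if (coordinates[0] == i+1) and (coordinates[1] < min_Y_c2):
--                 min_Y_c2 = coordinates[1]
--         bumpiness += abs(min_Y_c1 - min_Y_c2)
--     return bumpiness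
-- ===== SOURCE B (Python) =====
-- def getBumpiness(virtualgame):
--     mins = {c: 30 for c in range(1, 9)}
--     for c, y in virtualgame:
--         if 1 <= c <= 8 and y < mins[c]:
--             mins[c] = y
--     return sum(abs(mins[i] - mins[i + 1]) for i in range(1, 8))
-- ===== Notes on version B (the rewrite author's own statement) =====
-- stated objective: simpler
-- what changed: Replaces the 7 nested rescans of virtualgame (one per adjacent column pair) with a single pass that builds a per-column minimum table, followed by a short loop summing adjacent absolute differences.
import Mathlib
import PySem

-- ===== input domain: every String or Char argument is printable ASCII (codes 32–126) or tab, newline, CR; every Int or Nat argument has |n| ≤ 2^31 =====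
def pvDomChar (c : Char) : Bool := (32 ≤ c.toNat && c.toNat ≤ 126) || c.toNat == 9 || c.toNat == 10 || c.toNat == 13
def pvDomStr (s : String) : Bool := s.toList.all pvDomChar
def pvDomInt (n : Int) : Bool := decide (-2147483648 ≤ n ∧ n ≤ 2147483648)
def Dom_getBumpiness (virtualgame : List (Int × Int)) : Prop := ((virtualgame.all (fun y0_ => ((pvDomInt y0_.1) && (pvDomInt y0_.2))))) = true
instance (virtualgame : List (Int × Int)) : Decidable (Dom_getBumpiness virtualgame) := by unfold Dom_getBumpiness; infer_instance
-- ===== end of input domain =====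

-- B replaces A's 7 rescans of virtualgame with one table-building pass plus a short
-- second loop over adjacent columns (objective: simpler).

-- ===== PORT A =====
def getBumpiness (virtualgame : List (Int × Int)) : Int :=
  (PySem.List.pyRange 1 8 1).foldl (fun bumpiness i =>
    let p := virtualgame.foldl (fun (m : Int × Int) coordinates =>
      (if coordinates.1 == i && coordinates.2 < m.1 then coordinates.2 else m.1,
       if coordinates.1 == i + 1 && coordinates.2 < m.2 then coordinates.2 else m.2))
      (30, 30)
    bumpiness + |p.1 - p.2|) 0

-- ===== PORT B =====
def getBumpiness_alt (virtualgame : List (Int × Int)) : Int :=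
  let mins0 : PySem.Dict Int Int :=
    (PySem.List.pyRange 1 9 1).foldl (fun d c => d.insert c 30) PySem.Dict.empty
  let mins := virtualgame.foldl (fun d p =>
    if 1 ≤ p.1 && p.1 ≤ 8 && p.2 < d.getD p.1 0 then d.insert p.1 p.2 else d) mins0
  -- mins[i] in Source B always hits an existing key (1..8 are preinitialised), so getD is exact here
  (PySem.List.pyRange 1 8 1).foldl (fun s i => s + |mins.getD i 0 - mins.getD (i + 1) 0|) 0

-- ===== PRECONDITION & SPEC =====
def Spec_getBumpiness (virtualgame : List (Int × Int)) (out : Int) : Prop := out = getBumpiness_alt virtualgame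
instance (virtualgame : List (Int × Int)) (out : Int) : Decidable (Spec_getBumpiness virtualgame out) := by unfold Spec_getBumpiness; infer_instance

-- ===== CLAIM (what is proved, stated in full; the proofs are below) =====
def Claim_equal_getBumpiness : Prop := ∀ (virtualgame : List (Int × Int)), Dom_getBumpiness virtualgame → Spec_getBumpiness virtualgame (getBumpiness virtualgame)

-- ===== LEMMAS AND PROOFS =====

-- the running minimum of column i over vg, starting from a
def minFold (vg : List (Int × Int)) (i a : Int) : Int :=
  vg.foldl (fun m c => if c.1 == i && c.2 < m then c.2 else m) a

-- A's inner pair-fold computes the two column minima independently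
theorem pairFold_eq (vg : List (Int × Int)) (i : Int) :
    ∀ a b : Int,
    vg.foldl (fun (m : Int × Int) c =>
      (if c.1 == i && c.2 < m.1 then c.2 else m.1,
       if c.1 == i + 1 && c.2 < m.2 then c.2 else m.2)) (a, b)
    = (minFold vg i a, minFold vg (i + 1) b) := by
  induction vg with
  | nil => intro a b; simp [minFold]
  | cons c t ih => intro a b; simp only [List.foldl_cons, minFold] at *; exact ih _ _

-- B's dict-building pass, observed at a column j ∈ [1,8], is the running minimum of column j
theorem dictFold_getD (vg : List (Int × Int)) :
    ∀ (d : PySem.Dict Int Int) (j : Int), 1 ≤ j → j ≤ 8 →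
    (vg.foldl (fun d p =>
      if 1 ≤ p.1 && p.1 ≤ 8 && p.2 < d.getD p.1 0 then d.insert p.1 p.2 else d) d).getD j 0
    = minFold vg j (d.getD j 0) := by
  induction vg with
  | nil => intro d j _ _; simp [minFold]
  | cons c t ih =>
    intro d j h1 h2
    simp only [List.foldl_cons]
    rw [ih _ j h1 h2]
    simp only [minFold, List.foldl_cons]
    congr 1
    by_cases hc : c.1 = j
    · subst hc
      have hrange : (decide (1 ≤ c.1) && decide (c.1 ≤ 8) && decide (c.2 < d.getD c.1 0))
          = (c.1 == c.1 && decide (c.2 < d.getD c.1 0)) := by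
        simp [h1, h2]
      rw [hrange]
      by_cases hlt : c.2 < d.getD c.1 0
      · simp [hlt, PySem.Dict.getD_insert_self]
      · simp [hlt]
    · have hr : (c.1 == j && decide (c.2 < d.getD j 0)) = false := by simp [hc]
      rw [hr]
      simp only [Bool.false_eq_true, if_false]
      split_ifs with h
      · exact PySem.Dict.getD_insert_of_ne _ _ _ (Ne.symm hc)
      · rfl

theorem getBumpiness_spec_aux (vg : List (Int × Int)) :
    getBumpiness vg = getBumpiness_alt vg := by
  unfold getBumpiness getBumpiness_alt
  have hr8 : PySem.List.pyRange 1 8 1 = [1, 2, 3, 4, 5, 6, 7] := by decide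
  have hr9 : PySem.List.pyRange 1 9 1 = [1, 2, 3, 4, 5, 6, 7, 8] := by decide
  rw [hr8, hr9]
  have hd : ∀ j : Int, 1 ≤ j → j ≤ 8 →
      (vg.foldl (fun d p =>
        if 1 ≤ p.1 && p.1 ≤ 8 && p.2 < d.getD p.1 0 then d.insert p.1 p.2 else d)
        (([1, 2, 3, 4, 5, 6, 7, 8] : List Int).foldl (fun d c => d.insert c 30)
          PySem.Dict.empty)).getD j 0 = minFold vg j 30 := by
    intro j h1 h2
    rw [dictFold_getD vg _ j h1 h2]
    congr 1
    interval_cases j <;> decide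
  simp only [List.foldl_cons, List.foldl_nil, pairFold_eq] at hd ⊢
  rw [hd 1 (by decide) (by decide), hd (1+1) (by decide) (by decide),
      hd 2 (by decide) (by decide), hd (2+1) (by decide) (by decide),
      hd 3 (by decide) (by decide), hd (3+1) (by decide) (by decide),
      hd 4 (by decide) (by decide), hd (4+1) (by decide) (by decide),
      hd 5 (by decide) (by decide), hd (5+1) (by decide) (by decide),
      hd 6 (by decide) (by decide), hd (6+1) (by decide) (by decide),
      hd 7 (by decide) (by decide), hd (7+1) (by decide) (by decide)]

-- ===== VERDICT (by name: the statement is the Claim_ definition above) =====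
theorem getBumpiness_spec : Claim_equal_getBumpiness := by
  intro vg _
  exact getBumpiness_spec_aux vg
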